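-- pv_equiv track=rewrite | github.com/Samkolhatkar/AquaQChallengeHub | Q01/01.py | to_hex_chars
-- ===== SOURCE A (Python) =====
-- def to_hex_chars(string_a):
--     new_string = ""
--     for a in range(0,len(string_a)):
--         if string_a[a] not in "0123456789abcdef":
--             new_string += '0'
--         else:
--             new_string += string_a[a]
--     return new_string
-- ===== SOURCE B (Python) =====
-- import re
--
-- def to_hex_chars(string_a):
--     return re.sub(r'[^0-9a-f]', '0', string_a)
-- ===== Notes on version B (the rewrite author's own statement) =====
-- stated objective: idiomatic
-- what changed: Replaces the explicit index loop, membership test and repeated string concatenation by a single regular-expression substitution re.sub(r'[^0-9a-f]', '0', string_a).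
import Mathlib
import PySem

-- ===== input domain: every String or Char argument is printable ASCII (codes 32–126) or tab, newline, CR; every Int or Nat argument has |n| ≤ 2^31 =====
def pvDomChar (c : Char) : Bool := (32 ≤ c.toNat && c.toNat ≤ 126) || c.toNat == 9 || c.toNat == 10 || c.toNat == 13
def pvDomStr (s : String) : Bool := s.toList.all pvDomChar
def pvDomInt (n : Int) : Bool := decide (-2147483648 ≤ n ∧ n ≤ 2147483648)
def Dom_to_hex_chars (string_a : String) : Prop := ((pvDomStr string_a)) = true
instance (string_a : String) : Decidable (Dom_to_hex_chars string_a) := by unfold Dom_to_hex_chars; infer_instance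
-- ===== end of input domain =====

-- B replaces A's index loop + membership test + string concatenation by a single
-- regex substitution re.sub(r'[^0-9a-f]', '0', string_a); objective: idiomatic.

-- ===== PORT A =====
-- literal port: for a in range(0, len(string_a)): membership test of string_a[a]
-- in the literal hex whitelist, '+='-accumulation of the output characters
def to_hex_chars (string_a : String) : String :=
  String.mk
    ((PySem.List.pyRange 0 (string_a.toList.length : Int) 1).foldl
      (fun acc a =>
        if ¬ (PySem.List.pyGetD string_a.toList a ' ' ∈ "0123456789abcdef".toList) then
          acc ++ ['0']
        else
          acc ++ [PySem.List.pyGetD string_a.toList a ' ']) [])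

-- ===== PORT B =====
-- port of re.sub(r'[^0-9a-f]', '0', string_a): the character class [0-9a-f] as
-- the two range checks of the regex, substitution as a map over the characters
def pvHexClass (c : Char) : Bool :=
  ('0' ≤ c && c ≤ '9') || ('a' ≤ c && c ≤ 'f')

def to_hex_chars_alt (string_a : String) : String :=
  String.mk (string_a.toList.map (fun c => if pvHexClass c then c else '0'))

-- ===== PRECONDITION & SPEC =====
def Spec_to_hex_chars (string_a : String) (out : String) : Prop := out = to_hex_chars_alt string_a
instance (string_a : String) (out : String) : Decidable (Spec_to_hex_chars string_a out) := by unfold Spec_to_hex_chars; infer_instance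

-- ===== CLAIM (what is proved, stated in full; the proofs are below) =====
def Claim_equal_to_hex_chars : Prop := ∀ (string_a : String), Dom_to_hex_chars string_a → Spec_to_hex_chars string_a (to_hex_chars string_a)

-- ===== LEMMAS AND PROOFS =====

theorem hexlist_eq : "0123456789abcdef".toList
    = ['0','1','2','3','4','5','6','7','8','9','a','b','c','d','e','f'] := by decide

-- the literal whitelist "0123456789abcdef" is exactly the character class [0-9a-f]
theorem mem_hex_iff (c : Char) :
    (c ∈ "0123456789abcdef".toList) ↔ pvHexClass c = true := by
  have e0 : ('0':Char).val.toNat = 48 := by decide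
  have e9 : ('9':Char).val.toNat = 57 := by decide
  have ea : ('a':Char).val.toNat = 97 := by decide
  have ef : ('f':Char).val.toNat = 102 := by decide
  have h2 : pvHexClass c = true ↔ (48 ≤ c.toNat ∧ c.toNat ≤ 57) ∨ (97 ≤ c.toNat ∧ c.toNat ≤ 102) := by
    unfold pvHexClass
    rw [Bool.or_eq_true, Bool.and_eq_true, Bool.and_eq_true]
    simp only [decide_eq_true_eq, Char.le_def, UInt32.le_iff_toNat_le, e0, e9, ea, ef]
    exact Iff.rfl
  rw [h2, hexlist_eq]
  constructor
  · intro h; fin_cases h <;> simp [Char.toNat]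
  · intro h
    have hofnat := Char.ofNat_toNat c
    have hb1 : 48 ≤ c.toNat := by omega
    have hb2 : c.toNat ≤ 102 := by omega
    interval_cases hn : c.toNat <;> first
      | (exfalso; omega)
      | (rw [← hofnat]; decide)

-- A's accumulation loop over the characters equals B's per-character map
theorem foldl_hex (cs : List Char) (acc : List Char) :
    cs.foldl (fun acc x =>
        if ¬ (x ∈ "0123456789abcdef".toList) then acc ++ ['0'] else acc ++ [x]) acc
      = acc ++ cs.map (fun c => if pvHexClass c then c else '0') := by
  induction cs generalizing acc with
  | nil => simp
  | cons x t ih =>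
    rw [List.foldl_cons, List.map_cons, ih]
    by_cases h : x ∈ "0123456789abcdef".toList
    · rw [if_neg (not_not_intro h), if_pos ((mem_hex_iff x).mp h)]
      simp
    · rw [if_pos h, if_neg (fun hc => h ((mem_hex_iff x).mpr hc))]
      simp

-- ===== VERDICT (by name: the statement is the Claim_ definition above) =====
theorem to_hex_chars_spec : Claim_equal_to_hex_chars := by
  intro s _
  unfold Spec_to_hex_chars to_hex_chars to_hex_chars_alt
  rw [PySem.List.foldl_pyRange_zero_pyGetD' s.toList ' '
    (fun acc x => if ¬ (x ∈ "0123456789abcdef".toList) then acc ++ ['0'] else acc ++ [x]) []]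
  rw [foldl_hex]
  simp
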